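-- pv_equiv track=rewrite | github.com/CSCfi/cccp-ops-contrib | cloudmailer/cloudmailer.py | getNodeWithoutGroups
-- ===== SOURCE A (Python) =====
-- def getHypervisorWithMostGroups(nodes):
-- # We want to upgrade the nodes with the most limitings first.
-- # So that we don't get stuck with a lot of singe node batches
-- # in the end.
--     max_value = -1
--     node_name = 0
--     for i in nodes:
--         if len(nodes[i]) > max_value:
--             node_name = i
--             max_value = len(nodes[i])
--     return node_name
--
-- def getNodeWithoutGroups(groups, local_nodes):
-- # For finding a node for the batch that does only have new groups.
--     while True:
--         temp_node = getHypervisorWithMostGroups(local_nodes)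
--         if temp_node == 0:
--             return 0
--         found_it = True
--         for group in groups:
--             if group in local_nodes[temp_node]:
--                 found_it = False
--                 break
--         if found_it:
--             return temp_node
--         local_nodes.pop(temp_node, None)
-- ===== SOURCE B (Python) =====
-- def getNodeWithoutGroups(groups, local_nodes):
--     # Single pass: the node A ends up returning is the node with the most
--     # groups among those whose groups are disjoint from `groups` (first one
--     # on ties), or 0 if none. Does not mutate local_nodes (A pops from it).
--     gs = set(groups)
--     best_node, best_count = 0, -1
--     for node, node_groups in local_nodes.items():
--         if len(node_groups) > best_count and gs.isdisjoint(node_groups):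
--             best_node, best_count = node, len(node_groups)
--     return best_node
-- ===== Notes on version B (the rewrite author's own statement) =====
-- stated objective: faster
-- what changed: Replaces A's repeated extract-max-and-pop scans over the dict with a single pass that tracks the best non-overlapping node, using a set of groups for O(1) membership instead of A's linear 'in list' tests.
-- outside the precondition, e.g. on getNodeWithoutGroups([1], {0: [1], 2: []}): A returns 0, B returns 2
import Mathlib
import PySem

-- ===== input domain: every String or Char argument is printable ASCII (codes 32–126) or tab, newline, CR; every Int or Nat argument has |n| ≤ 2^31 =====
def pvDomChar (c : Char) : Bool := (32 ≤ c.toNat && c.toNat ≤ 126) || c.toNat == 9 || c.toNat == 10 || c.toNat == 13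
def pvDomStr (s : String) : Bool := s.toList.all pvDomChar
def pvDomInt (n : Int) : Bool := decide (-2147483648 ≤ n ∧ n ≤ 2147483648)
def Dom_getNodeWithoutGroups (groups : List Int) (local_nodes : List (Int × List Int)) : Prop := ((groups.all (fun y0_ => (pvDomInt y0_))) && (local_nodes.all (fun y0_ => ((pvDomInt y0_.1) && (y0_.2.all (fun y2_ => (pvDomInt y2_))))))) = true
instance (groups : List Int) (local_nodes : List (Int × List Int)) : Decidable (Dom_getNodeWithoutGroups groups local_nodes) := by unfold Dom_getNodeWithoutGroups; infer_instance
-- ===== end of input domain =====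

-- B replaces A's repeated extract-max-and-pop scans by one pass tracking the best
-- non-overlapping node (faster). A pops entries from local_nodes, B does not mutate it:
-- the equivalence proved here is about the RETURN value only.

-- ===== PORT A =====
-- nodes[i] for a dict: first-match association-list lookup (exact for a dict, whose
-- keys are unique; in A the key i is always present, so the [] default is never used).
def pvLookupD (nodes : List (Int × List Int)) (k : Int) : List Int :=
  match nodes with
  | [] => []
  | (a, b) :: t => if a == k then b else pvLookupD t k

def getHypervisorWithMostGroups (nodes : List (Int × List Int)) : Int :=
  (nodes.foldl
    (fun (st : Int × Int) i =>
      if ((pvLookupD nodes i.1).length : Int) > st.1 then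
        (((pvLookupD nodes i.1).length : Int), i.1)
      else st)
    (-1, 0)).2

-- termination helper: a non-zero result of getHypervisorWithMostGroups is one of the keys
theorem pvHypFold_mem (nodes l : List (Int × List Int)) : ∀ (st : Int × Int),
    (l.foldl
      (fun (st : Int × Int) i =>
        if ((pvLookupD nodes i.1).length : Int) > st.1 then
          (((pvLookupD nodes i.1).length : Int), i.1)
        else st) st).2 = st.2
    ∨ ∃ p ∈ l, (l.foldl
      (fun (st : Int × Int) i =>
        if ((pvLookupD nodes i.1).length : Int) > st.1 then
          (((pvLookupD nodes i.1).length : Int), i.1)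
        else st) st).2 = p.1 := by
  induction l with
  | nil => intro st; left; rfl
  | cons q t ih =>
    intro st
    simp only [List.foldl_cons]
    rcases ih (if ((pvLookupD nodes q.1).length : Int) > st.1 then
        (((pvLookupD nodes q.1).length : Int), q.1) else st) with h | ⟨p, hp, h⟩
    · by_cases hc : ((pvLookupD nodes q.1).length : Int) > st.1
      · right; exact ⟨q, List.mem_cons_self, by simp [hc] at h ⊢; exact h⟩
      · left; simp [hc] at h ⊢; exact h
    · right; exact ⟨p, List.mem_cons_of_mem _ hp, h⟩

theorem pvEraseP_lt (k : Int) : ∀ (l : List (Int × List Int)), (∃ p ∈ l, p.1 = k) →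
    (l.eraseP (fun p => p.1 == k)).length < l.length := by
  intro l hl
  induction l with
  | nil => simp at hl
  | cons q t ih =>
    by_cases hq : q.1 = k
    · simp [hq]
    · rcases hl with ⟨p, hp, hpk⟩
      rcases List.mem_cons.mp hp with rfl | hpt
      · exact absurd hpk hq
      · simp only [List.eraseP_cons, show (q.1 == k) = false by simp [hq]]
        simpa using Nat.succ_lt_succ (ih ⟨p, hpt, hpk⟩)

def getNodeWithoutGroups (groups : List Int) (local_nodes : List (Int × List Int)) : Int :=
  let temp_node := getHypervisorWithMostGroups local_nodes
  if h : temp_node = 0 then 0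
  else
    -- for group in groups: if group in local_nodes[temp_node]: found_it = False; break
    let found_it := groups.all (fun g => !((pvLookupD local_nodes temp_node).contains g))
    if found_it then temp_node
    else getNodeWithoutGroups groups (local_nodes.eraseP (fun p => p.1 == temp_node))
termination_by local_nodes.length
decreasing_by
  rcases pvHypFold_mem local_nodes local_nodes (-1, 0) with h0 | ⟨p, hp, hk⟩
  · exact absurd h0 h
  · exact pvEraseP_lt _ local_nodes ⟨p, hp, hk.symm⟩

-- ===== PORT B =====
def getNodeWithoutGroups_alt (groups : List Int) (local_nodes : List (Int × List Int)) : Int :=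
  let gs := PySem.Set.ofList groups
  (local_nodes.foldl
    (fun (st : Int × Int) p =>
      if ((p.2.length : Int) > st.2 && p.2.all (fun x => !(PySem.Set.contains gs x))) then
        (p.1, (p.2.length : Int))
      else st)
    (0, -1)).1

-- ===== PRECONDITION & SPEC =====
-- Pre_ excludes association lists with duplicate keys (those do not represent a Python dict)
-- and dicts in which node 0 -- the value A uses as its not-found sentinel -- carries one of
-- `groups`: there A's early 'return 0' and B's best non-overlapping node are both defensible.
def Pre_getNodeWithoutGroups (groups : List Int) (local_nodes : List (Int × List Int)) : Prop :=
  (local_nodes.map Prod.fst).Nodup ∧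
    ∀ p ∈ local_nodes, p.1 = 0 → ∀ g ∈ groups, g ∉ p.2
instance (groups : List Int) (local_nodes : List (Int × List Int)) : Decidable (Pre_getNodeWithoutGroups groups local_nodes) := by unfold Pre_getNodeWithoutGroups; infer_instance

def pvWitness_getNodeWithoutGroups : List Int × (List (Int × List Int)) :=
  ([1, 2], [(3, [4]), (5, [1])])

def Spec_getNodeWithoutGroups (groups : List Int) (local_nodes : List (Int × List Int)) (out : Int) : Prop := out = getNodeWithoutGroups_alt groups local_nodes
instance (groups : List Int) (local_nodes : List (Int × List Int)) (out : Int) : Decidable (Spec_getNodeWithoutGroups groups local_nodes out) := by unfold Spec_getNodeWithoutGroups; infer_instance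

-- ===== CLAIM (what is proved, stated in full; the proofs are below) =====
def Claim_equal_getNodeWithoutGroups : Prop := ∀ (groups : List Int) (local_nodes : List (Int × List Int)), Dom_getNodeWithoutGroups groups local_nodes → Pre_getNodeWithoutGroups groups local_nodes → Spec_getNodeWithoutGroups groups local_nodes (getNodeWithoutGroups groups local_nodes)

-- ===== LEMMAS AND PROOFS =====

-- the pure scan-for-max step/fold (A's getHypervisor fold with the lookups resolved)
def pvStep (st : Int × Int) (p : Int × List Int) : Int × Int :=
  if (p.2.length : Int) > st.1 then ((p.2.length : Int), p.1) else st

def pvFA (st : Int × Int) (ln : List (Int × List Int)) : Int × Int := ln.foldl pvStep st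

-- "node p has none of `groups`" in A's shape
def pvOk (groups : List Int) (p : Int × List Int) : Bool :=
  groups.all (fun g => !(p.2.contains g))

theorem pvFA_cons (st : Int × Int) (q : Int × List Int) (t : List (Int × List Int)) :
    pvFA st (q :: t) = pvFA (pvStep st q) t := rfl

theorem pvLookupD_eq {ln : List (Int × List Int)} (hnd : (ln.map Prod.fst).Nodup)
    {p : Int × List Int} (hp : p ∈ ln) : pvLookupD ln p.1 = p.2 := by
  induction ln with
  | nil => simp at hp
  | cons q t ih =>
    rw [List.map_cons] at hnd
    have hnd' := List.nodup_cons.mp hnd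
    rcases List.mem_cons.mp hp with rfl | hpt
    · simp [pvLookupD]
    · have hne : q.1 ≠ p.1 := by
        intro h
        have : p.1 ∈ t.map Prod.fst := List.mem_map.mpr ⟨p, hpt, rfl⟩
        rw [← h] at this
        exact hnd'.1 this
      simp only [pvLookupD, beq_iff_eq, if_neg hne]
      exact ih hnd'.2 hpt

theorem pvKeyInj {ln : List (Int × List Int)} (hnd : (ln.map Prod.fst).Nodup)
    {p q : Int × List Int} (hp : p ∈ ln) (hq : q ∈ ln) (h : p.1 = q.1) : p = q := by
  induction ln with
  | nil => simp at hp
  | cons r t ih =>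
    rw [List.map_cons] at hnd
    have hnd' := List.nodup_cons.mp hnd
    rcases List.mem_cons.mp hp with rfl | hpt <;> rcases List.mem_cons.mp hq with rfl | hqt
    · rfl
    · have hm : q.1 ∈ t.map Prod.fst := List.mem_map.mpr ⟨q, hqt, rfl⟩
      rw [← h] at hm
      exact absurd hm hnd'.1
    · have hm : p.1 ∈ t.map Prod.fst := List.mem_map.mpr ⟨p, hpt, rfl⟩
      rw [h] at hm
      exact absurd hm hnd'.1
    · exact ih hnd'.2 hpt hqt

theorem pvHyp_eq_fA {ln : List (Int × List Int)} (hnd : (ln.map Prod.fst).Nodup) :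
    getHypervisorWithMostGroups ln = (pvFA (-1, 0) ln).2 := by
  unfold getHypervisorWithMostGroups pvFA
  congr 1
  apply PySem.List.foldl_congr_mem
  intro acc x hx
  simp only [pvStep, pvLookupD_eq hnd hx]

theorem pvFA_ub : ∀ (ln : List (Int × List Int)) (st : Int × Int),
    st.1 ≤ (pvFA st ln).1 ∧ ∀ p ∈ ln, ((p.2.length : Int)) ≤ (pvFA st ln).1 := by
  intro ln
  induction ln with
  | nil => intro st; exact ⟨le_refl _, by simp⟩
  | cons q t ih =>
    intro st
    rw [pvFA_cons]
    have h1 := ih (pvStep st q)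
    have hs : st.1 ≤ (pvStep st q).1 := by
      unfold pvStep; split_ifs with h
      · exact le_of_lt h
      · exact le_refl _
    have hq : ((q.2.length : Int)) ≤ (pvStep st q).1 := by
      unfold pvStep; split_ifs with h
      · exact le_refl _
      · omega
    refine ⟨le_trans hs h1.1, ?_⟩
    intro p hp
    rcases List.mem_cons.mp hp with rfl | hpt
    · exact le_trans hq h1.1
    · exact h1.2 p hpt

theorem pvFA_cases : ∀ (ln : List (Int × List Int)) (st : Int × Int),
    pvFA st ln = st ∨ ∃ p ∈ ln, pvFA st ln = ((p.2.length : Int), p.1) ∧ st.1 < (p.2.length : Int) := by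
  intro ln
  induction ln with
  | nil => intro st; left; rfl
  | cons q t ih =>
    intro st
    rw [pvFA_cons]
    by_cases hc : (q.2.length : Int) > st.1
    · rw [show pvStep st q = ((q.2.length : Int), q.1) by simp [pvStep, hc]]
      rcases ih ((q.2.length : Int), q.1) with h | ⟨p, hp, h, hlt⟩
      · right; exact ⟨q, List.mem_cons_self, h, hc⟩
      · right; exact ⟨p, List.mem_cons_of_mem _ hp, h, by simp at hlt; omega⟩
    · rw [show pvStep st q = st by simp [pvStep, hc]]
      rcases ih st with h | ⟨p, hp, h, hlt⟩
      · left; exact h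
      · right; exact ⟨p, List.mem_cons_of_mem _ hp, h, hlt⟩

theorem pvFA_noup : ∀ (ln : List (Int × List Int)) (st : Int × Int),
    (∀ p ∈ ln, ((p.2.length : Int)) ≤ st.1) → pvFA st ln = st := by
  intro ln
  induction ln with
  | nil => intro st _; rfl
  | cons q t ih =>
    intro st h
    have hq : ¬ ((q.2.length : Int) > st.1) := by
      have := h q List.mem_cons_self; omega
    rw [pvFA_cons, show pvStep st q = st by simp [pvStep, hq]]
    exact ih st (fun p hp => h p (List.mem_cons_of_mem _ hp))

-- core: the unfiltered scan and the scan over the ok-filtered list select the same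
-- element, unless the unfiltered winner is a non-ok element (or nothing won at all)
theorem pvFA_filter (groups : List Int) : ∀ (ln : List (Int × List Int)) (m k m' k' : Int),
    m' ≤ m →
    pvFA (m, k) ln = pvFA (m', k') (ln.filter (pvOk groups)) ∨
    (∃ p ∈ ln, pvOk groups p = false ∧ pvFA (m, k) ln = ((p.2.length : Int), p.1)) ∨
    (pvFA (m, k) ln).1 ≤ m := by
  intro ln
  induction ln with
  | nil => intro m k m' k' _; right; right; exact le_refl _
  | cons q t ih =>
    intro m k m' k' hmm
    by_cases hq : (q.2.length : Int) > m
    · have hs1 : pvFA (m, k) (q :: t) = pvFA ((q.2.length : Int), q.1) t := by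
        rw [pvFA_cons, show pvStep (m, k) q = ((q.2.length : Int), q.1) by simp [pvStep, hq]]
      by_cases hok : pvOk groups q = true
      · -- filtered list keeps q, and q updates there too (m' ≤ m < len q)
        have hs2 : pvFA (m', k') ((q :: t).filter (pvOk groups)) =
            pvFA ((q.2.length : Int), q.1) (t.filter (pvOk groups)) := by
          rw [List.filter_cons_of_pos hok, pvFA_cons,
            show pvStep (m', k') q = ((q.2.length : Int), q.1) by simp [pvStep]; omega]
        rw [hs1, hs2]
        rcases ih (q.2.length : Int) q.1 (q.2.length : Int) q.1 (le_refl _) with h | ⟨p, hp, hpok, h⟩ | h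
        · left; exact h
        · right; left; exact ⟨p, List.mem_cons_of_mem _ hp, hpok, h⟩
        · -- nothing beat q: both folds stay at (len q, q.1)
          have hub := (pvFA_ub t ((q.2.length : Int), q.1)).2
          have heq1 : pvFA ((q.2.length : Int), q.1) t = ((q.2.length : Int), q.1) := by
            rcases pvFA_cases t ((q.2.length : Int), q.1) with h1 | ⟨p, hp, h1, hlt⟩
            · exact h1
            · exfalso; rw [h1] at h; simp at h hlt; omega
          have heq2 : pvFA ((q.2.length : Int), q.1) (t.filter (pvOk groups)) = ((q.2.length : Int), q.1) := by
            apply pvFA_noup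
            intro p hp
            have := hub p (List.mem_of_mem_filter hp)
            rw [heq1] at this; simpa using this
          left; rw [heq1, heq2]
      · -- q not ok: filtered list drops q
        have hs2 : (q :: t).filter (pvOk groups) = t.filter (pvOk groups) :=
          List.filter_cons_of_neg (by simpa using hok)
        rw [hs1, hs2]
        rcases ih (q.2.length : Int) q.1 m' k' (by omega) with h | ⟨p, hp, hpok, h⟩ | h
        · left; exact h
        · right; left; exact ⟨p, List.mem_cons_of_mem _ hp, hpok, h⟩
        · -- nothing beat q in the unfiltered fold: winner is q, which is not ok
          have heq1 : pvFA ((q.2.length : Int), q.1) t = ((q.2.length : Int), q.1) := by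
            rcases pvFA_cases t ((q.2.length : Int), q.1) with h1 | ⟨p, hp, h1, hlt⟩
            · exact h1
            · exfalso; rw [h1] at h; simp at h hlt; omega
          right; left
          exact ⟨q, List.mem_cons_self, by simpa using hok, heq1⟩
    · -- q does not update the unfiltered fold
      have hs1 : pvFA (m, k) (q :: t) = pvFA (m, k) t := by
        rw [pvFA_cons, show pvStep (m, k) q = (m, k) by simp [pvStep, hq]]
      by_cases hok : pvOk groups q = true
      · by_cases hq' : (q.2.length : Int) > m'
        · have hs2 : pvFA (m', k') ((q :: t).filter (pvOk groups)) =
              pvFA ((q.2.length : Int), q.1) (t.filter (pvOk groups)) := by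
            rw [List.filter_cons_of_pos hok, pvFA_cons,
              show pvStep (m', k') q = ((q.2.length : Int), q.1) by simp [pvStep, hq']]
          rw [hs1, hs2]
          have hle : (q.2.length : Int) ≤ m := by omega
          rcases ih m k (q.2.length : Int) q.1 hle with h | ⟨p, hp, h1, h2⟩ | h
          · left; exact h
          · right; left; exact ⟨p, List.mem_cons_of_mem _ hp, h1, h2⟩
          · right; right; exact h
        · have hs2 : pvFA (m', k') ((q :: t).filter (pvOk groups)) =
              pvFA (m', k') (t.filter (pvOk groups)) := by
            rw [List.filter_cons_of_pos hok, pvFA_cons,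
              show pvStep (m', k') q = (m', k') by simp [pvStep, hq']]
          rw [hs1, hs2]
          rcases ih m k m' k' hmm with h | ⟨p, hp, h1, h2⟩ | h
          · left; exact h
          · right; left; exact ⟨p, List.mem_cons_of_mem _ hp, h1, h2⟩
          · right; right; exact h
      · have hs2 : (q :: t).filter (pvOk groups) = t.filter (pvOk groups) :=
          List.filter_cons_of_neg (by simpa using hok)
        rw [hs1, hs2]
        rcases ih m k m' k' hmm with h | ⟨p, hp, h1, h2⟩ | h
        · left; exact h
        · right; left; exact ⟨p, List.mem_cons_of_mem _ hp, h1, h2⟩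
        · right; right; exact h

-- erasing a non-ok binding does not change the ok-filtered list (keys unique)
theorem pvFilter_eraseP (groups : List Int) : ∀ (ln : List (Int × List Int)),
    (ln.map Prod.fst).Nodup → ∀ p ∈ ln, pvOk groups p = false →
    (ln.eraseP (fun q => q.1 == p.1)).filter (pvOk groups) = ln.filter (pvOk groups) := by
  intro ln
  induction ln with
  | nil => intro _ p hp; simp at hp
  | cons q t ih =>
    intro hnd p hp hok
    rw [List.map_cons] at hnd
    have hnd' := List.nodup_cons.mp hnd
    by_cases hq : q.1 = p.1
    · have hpq : p = q := by
        rcases List.mem_cons.mp hp with rfl | hpt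
        · rfl
        · have hm : p.1 ∈ t.map Prod.fst := List.mem_map.mpr ⟨p, hpt, rfl⟩
          rw [← hq] at hm
          exact absurd hm hnd'.1
      rw [List.eraseP_cons_of_pos (by simp [hq])]
      rw [List.filter_cons_of_neg (by rw [← hpq, hok]; simp)]
    · have hpt : p ∈ t := by
        rcases List.mem_cons.mp hp with rfl | h
        · exact absurd rfl hq
        · exact h
      rw [List.eraseP_cons_of_neg (by simp [hq])]
      by_cases hqok : pvOk groups q = true
      · rw [List.filter_cons_of_pos hqok, List.filter_cons_of_pos hqok,
          ih hnd'.2 p hpt hok]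
      · rw [List.filter_cons_of_neg (by simpa using hqok),
          List.filter_cons_of_neg (by simpa using hqok), ih hnd'.2 p hpt hok]

-- A's loop computes the winner of the scan over the ok-filtered list
theorem pvA_eq (groups : List Int) : ∀ (n : ℕ) (ln : List (Int × List Int)), ln.length ≤ n →
    (ln.map Prod.fst).Nodup → (∀ p ∈ ln, p.1 = 0 → pvOk groups p = true) →
    getNodeWithoutGroups groups ln = (pvFA (-1, 0) (ln.filter (pvOk groups))).2 := by
  intro n
  induction n with
  | zero =>
    intro ln hlen hnd h0
    have : ln = [] := List.eq_nil_of_length_eq_zero (Nat.le_zero.mp hlen)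
    subst this
    rw [getNodeWithoutGroups]
    simp [getHypervisorWithMostGroups, pvFA]
  | succ n ih =>
    intro ln hlen hnd h0
    rcases pvFA_cases ln (-1, 0) with hfa | ⟨p, hp, hfa, hlt⟩
    · -- no element ever updated: only possible when ln = []
      have hln : ln = [] := by
        cases ln with
        | nil => rfl
        | cons q t =>
          exfalso
          have := (pvFA_ub (q :: t) (-1, 0)).2 q List.mem_cons_self
          rw [hfa] at this; simp at this; omega
      subst hln
      rw [getNodeWithoutGroups]
      simp [getHypervisorWithMostGroups, pvFA]
    · have htemp : getHypervisorWithMostGroups ln = p.1 := by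
        rw [pvHyp_eq_fA hnd, hfa]
      have hlook : pvLookupD ln p.1 = p.2 := pvLookupD_eq hnd hp
      -- if the winner p of the whole scan is ok, the ok-filtered scan also selects p
      have hfilt : pvOk groups p = true → (pvFA (-1, 0) (ln.filter (pvOk groups))).2 = p.1 := by
        intro hok
        rcases pvFA_filter groups ln (-1) 0 (-1) 0 (le_refl _) with h | ⟨q, hq, hqok, h⟩ | h
        · rw [← h, hfa]
        · rw [hfa] at h
          have hqp : q = p := pvKeyInj hnd hq hp (by
            have := congrArg Prod.snd h; simpa using this.symm)
          rw [hqp, hok] at hqok; exact absurd hqok (by simp)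
        · rw [hfa] at h; simp at h; omega
      by_cases hp0 : p.1 = 0
      · -- the sentinel case: A returns 0 = p.1; Pre_ makes node 0 ok, so B selects it too
        rw [getNodeWithoutGroups, htemp, dif_pos hp0, hfilt (h0 p hp hp0), hp0]
      · rw [getNodeWithoutGroups, htemp, dif_neg hp0]
        by_cases hok : pvOk groups p = true
        · rw [if_pos (by rw [hlook]; exact hok), hfilt hok]
        · rw [if_neg (by rw [hlook]; exact hok)]
          have hmem : ∃ q ∈ ln, q.1 = p.1 := ⟨p, hp, rfl⟩
          have hsub : (ln.eraseP (fun q => q.1 == p.1)).Sublist ln := List.eraseP_sublist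
          have hlen' : (ln.eraseP (fun q => q.1 == p.1)).length ≤ n := by
            have := pvEraseP_lt p.1 ln hmem; omega
          have hnd' : ((ln.eraseP (fun q => q.1 == p.1)).map Prod.fst).Nodup :=
            hnd.sublist (hsub.map _)
          have h0' : ∀ q ∈ ln.eraseP (fun q => q.1 == p.1), q.1 = 0 → pvOk groups q = true :=
            fun q hq => h0 q (hsub.mem hq)
          rw [ih _ hlen' hnd' h0',
            pvFilter_eraseP groups ln hnd p hp (by simpa using hok)]

-- B's disjointness test coincides with A's (both say: p shares no element with groups)
theorem pvOkB_eq (groups : List Int) (p : Int × List Int) :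
    (p.2.all (fun x => !(PySem.Set.contains (PySem.Set.ofList groups) x))) = pvOk groups p := by
  rw [Bool.eq_iff_iff]
  simp only [pvOk, List.all_eq_true, Bool.not_eq_true', ← Bool.not_eq_true,
    PySem.Set.contains_iff, PySem.Set.mem_ofList, List.contains_iff_mem]
  exact ⟨fun h g hg hx => h _ hx hg, fun h x hx hg => h _ hg hx⟩

-- B computes the winner of the same scan (state components swapped), for every input
theorem pvB_eq_aux (groups : List Int) : ∀ (ln : List (Int × List Int)) (a b : Int),
    ln.foldl
      (fun (st : Int × Int) p =>
        if ((p.2.length : Int) > st.2 && pvOk groups p) then (p.1, (p.2.length : Int)) else st) (a, b)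
    = ((pvFA (b, a) (ln.filter (pvOk groups))).2, (pvFA (b, a) (ln.filter (pvOk groups))).1) := by
  intro ln
  induction ln with
  | nil => intro a b; rfl
  | cons q t ih =>
    intro a b
    simp only [List.foldl_cons]
    by_cases hok : pvOk groups q = true
    · rw [List.filter_cons_of_pos hok, pvFA_cons]
      by_cases hc : (q.2.length : Int) > b
      · rw [show pvStep (b, a) q = ((q.2.length : Int), q.1) by simp [pvStep, hc]]
        rw [show (decide ((q.2.length : Int) > b) && pvOk groups q) = true by simp [hc, hok]]
        simp only [if_pos]
        exact ih q.1 (q.2.length : Int)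
      · rw [show pvStep (b, a) q = (b, a) by simp [pvStep, hc]]
        rw [show (decide ((q.2.length : Int) > b) && pvOk groups q) = false by simp [hc]]
        simp only [Bool.false_eq_true, if_false]
        exact ih a b
    · rw [List.filter_cons_of_neg (by simpa using hok)]
      rw [show (decide ((q.2.length : Int) > b) && pvOk groups q) = false by simp [hok]]
      simp only [Bool.false_eq_true, if_false]
      exact ih a b

theorem pvB_eq (groups : List Int) (ln : List (Int × List Int)) :
    getNodeWithoutGroups_alt groups ln = (pvFA (-1, 0) (ln.filter (pvOk groups))).2 := by
  have hfun : (fun (st : Int × Int) (p : Int × List Int) =>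
        if ((p.2.length : Int) > st.2 && p.2.all (fun x => !(PySem.Set.contains (PySem.Set.ofList groups) x))) then
          (p.1, (p.2.length : Int))
        else st)
      = (fun (st : Int × Int) (p : Int × List Int) =>
        if ((p.2.length : Int) > st.2 && pvOk groups p) then (p.1, (p.2.length : Int)) else st) := by
    funext st p
    rw [pvOkB_eq]
  show (ln.foldl
      (fun (st : Int × Int) p =>
        if ((p.2.length : Int) > st.2 && p.2.all (fun x => !(PySem.Set.contains (PySem.Set.ofList groups) x))) then
          (p.1, (p.2.length : Int))
        else st) (0, -1)).1 = _
  rw [hfun, pvB_eq_aux groups ln 0 (-1)]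

-- ===== VERDICT (by name: the statement is the Claim_ definition above) =====
theorem getNodeWithoutGroups_spec : Claim_equal_getNodeWithoutGroups := by
  intro groups ln _ hpre
  unfold Spec_getNodeWithoutGroups
  rw [pvB_eq groups ln]
  refine pvA_eq groups ln.length ln (le_refl _) hpre.1 ?_
  intro p hp hp0
  have := hpre.2 p hp hp0
  simp only [pvOk, List.all_eq_true, Bool.not_eq_true', ← Bool.not_eq_true,
    List.contains_iff_mem]
  exact fun g hg => this g hg
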